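-- pv_equiv track=rewrite | github.com/abrie/atl-council-scraper | app/citycouncil/scraper.py | buildContact
-- ===== SOURCE A (Python) =====
-- def buildContact(strings):
--     sections = {"Office Location":[],
--                 "P":[],
--                 "F":[],
--                 "E":[],
--                 "Committee Assignments":[]}
--
--     section = None
--
--     for string in strings:
--         if string in sections:
--             section = sections[string]
--         elif section != None:
--             section.append(string)
--
--     remapping = {"Office Location":"office",
--                  "P":"phone",
--                  "F":"fax",
--                  "E":"email",
--                  "Committee Assignments":"committees"}
--
--     remapped = {remapping.get(k, k): v for k, v in sections.items() if k in remapping}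
--
--     return remapped
-- ===== SOURCE B (Python) =====
-- def buildContact(strings):
--     KEYS = {"Office Location": "office",
--             "P": "phone",
--             "F": "fax",
--             "E": "email",
--             "Committee Assignments": "committees"}
--     result = {"office": [], "phone": [], "fax": [], "email": [], "committees": []}
--     n = len(strings)
--     i = 0
--     while i < n:
--         k = KEYS.get(strings[i])
--         i += 1
--         if k is not None:
--             start = i
--             while i < n and strings[i] not in KEYS:
--                 i += 1
--             result[k] = result[k] + strings[start:i]
--     return result
-- ===== Notes on version B (the rewrite author's own statement) =====
-- stated objective: alternative
-- what changed: B replaces A's one-element-at-a-time pass with a current-section reference (plus a separate remapping comprehension) by a chunk-based scan: it builds the result dict directly under the five final key names and, at each header occurrence, consumes the whole run of following non-header strings as one slice and appends it to that key's list.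
import Mathlib
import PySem

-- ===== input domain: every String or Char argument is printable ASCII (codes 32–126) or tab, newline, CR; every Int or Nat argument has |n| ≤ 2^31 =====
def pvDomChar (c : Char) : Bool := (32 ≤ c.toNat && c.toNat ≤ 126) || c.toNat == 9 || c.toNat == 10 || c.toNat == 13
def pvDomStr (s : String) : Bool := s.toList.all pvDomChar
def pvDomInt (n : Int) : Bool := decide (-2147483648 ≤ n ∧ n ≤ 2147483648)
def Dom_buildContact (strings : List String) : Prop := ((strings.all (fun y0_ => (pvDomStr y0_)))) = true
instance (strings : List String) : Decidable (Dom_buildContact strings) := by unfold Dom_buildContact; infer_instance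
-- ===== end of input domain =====

-- B changes the decomposition: chunk-based scan under final key names instead of
-- A's element-at-a-time pass with a current-section reference plus a remapping step.

-- shared vocabulary of both ports: the five section keys and the five result lists
inductive SecKey | office | phone | fax | email | committees
deriving DecidableEq, Repr

-- membership test in the two five-key dicts ('string in sections' / KEYS.get),
-- already remapped to the final key since the remapping is a fixed bijection
def keyOf? (s : String) : Option SecKey :=
  if s = "Office Location" then some SecKey.office
  else if s = "P" then some SecKey.phone
  else if s = "F" then some SecKey.fax
  else if s = "E" then some SecKey.email
  else if s = "Committee Assignments" then some SecKey.committees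
  else none

structure CSt where
  office : List String
  phone : List String
  fax : List String
  email : List String
  committees : List String
deriving DecidableEq, Repr

def appendTo (st : CSt) (k : SecKey) (xs : List String) : CSt :=
  match k with
  | SecKey.office => { st with office := st.office ++ xs }
  | SecKey.phone => { st with phone := st.phone ++ xs }
  | SecKey.fax => { st with fax := st.fax ++ xs }
  | SecKey.email => { st with email := st.email ++ xs }
  | SecKey.committees => { st with committees := st.committees ++ xs }

def outOf (st : CSt) : List (String × List String) :=
  [("office", st.office), ("phone", st.phone), ("fax", st.fax),
   ("email", st.email), ("committees", st.committees)]

-- ===== PORT A =====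
-- A's loop body: 'if string in sections: section = sections[string]
--                 elif section != None: section.append(string)'
def stepA (acc : CSt × Option SecKey) (s : String) : CSt × Option SecKey :=
  match keyOf? s with
  | some k => (acc.1, some k)
  | none =>
    match acc.2 with
    | some k => (appendTo acc.1 k [s], some k)
    | none => acc

def buildContact (strings : List String) : List (String × List String) :=
  outOf (strings.foldl stepA (⟨[], [], [], [], []⟩, none)).1

-- ===== PORT B =====
-- B's outer loop: at a header, the inner while-loop consumes the run of
-- non-header strings (takeWhile/dropWhile = the 'while i < n and strings[i] not in KEYS'
-- scan and the slice strings[start:i]) and appends it to that key's list in one step.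
def chunkB (l : List String) (st : CSt) : CSt :=
  match l with
  | [] => st
  | s :: rest =>
    match keyOf? s with
    | some k =>
      chunkB (rest.dropWhile (fun t => keyOf? t = none))
             (appendTo st k (rest.takeWhile (fun t => keyOf? t = none)))
    | none => chunkB rest st
termination_by l.length
decreasing_by
· exact Nat.lt_succ_of_le (List.length_dropWhile_le _ _)
· exact Nat.lt_succ_self _

def buildContact_alt (strings : List String) : List (String × List String) :=
  outOf (chunkB strings ⟨[], [], [], [], []⟩)

-- ===== PRECONDITION & SPEC =====
def Spec_buildContact (strings : List String) (out : List (String × List String)) : Prop := out = buildContact_alt strings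
instance (strings : List String) (out : List (String × List String)) : Decidable (Spec_buildContact strings out) := by unfold Spec_buildContact; infer_instance

-- ===== CLAIM (what is proved, stated in full; the proofs are below) =====
def Claim_equal_buildContact : Prop := ∀ (strings : List String), Dom_buildContact strings → Spec_buildContact strings (buildContact strings)

-- ===== LEMMAS AND PROOFS =====
theorem appendTo_nil (st : CSt) (k : SecKey) : appendTo st k [] = st := by
  cases k <;> simp [appendTo]

theorem appendTo_append (st : CSt) (k : SecKey) (s : String) (xs : List String) :
    appendTo (appendTo st k [s]) k xs = appendTo st k (s :: xs) := by
  cases k <;> simp [appendTo]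

theorem foldA_some (l : List String) (st : CSt) (k : SecKey) :
    (l.foldl stepA (st, some k)).1 =
      chunkB (l.dropWhile (fun t => keyOf? t = none))
             (appendTo st k (l.takeWhile (fun t => keyOf? t = none))) := by
  induction l generalizing st k with
  | nil => simp [chunkB, appendTo_nil]
  | cons s rest ih =>
    cases h : keyOf? s with
    | some k' =>
      simp [List.foldl, stepA, h, ih, chunkB, appendTo_nil, List.takeWhile, List.dropWhile]
    | none =>
      simp [List.foldl, stepA, h, ih, List.takeWhile, List.dropWhile, appendTo_append]

theorem foldA_none (l : List String) (st : CSt) :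
    (l.foldl stepA (st, none)).1 = chunkB l st := by
  induction l generalizing st with
  | nil => simp [chunkB]
  | cons s rest ih =>
    cases h : keyOf? s with
    | some k => simp [List.foldl, stepA, h, foldA_some, chunkB]
    | none => simp [List.foldl, stepA, h, ih, chunkB]

-- ===== VERDICT (by name: the statement is the Claim_ definition above) =====
theorem buildContact_spec : Claim_equal_buildContact := by
  intro strings _
  show buildContact strings = buildContact_alt strings
  simp [buildContact, buildContact_alt, foldA_none]
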